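-- pv_equiv track=rewrite | github.com/ShogoMakishima22/Informatics_573_Assigment_2 | data_analysis_assgn2.py | analyze_sequence_by_kilobase
-- ===== SOURCE A (Python) =====
-- def analyze_sequence_by_kilobase(sequence):
--     """
--     Create a nested dictionary with nucleotide counts for each kilobase.
--     Returns dict where keys are kilobase positions (0, 1000, 2000, etc.)
--     and values are dictionaries with nucleotide counts.
--     """
--     analysis_dict = {}
--     sequence_length = len(sequence)
--
--     # Process sequence in 1000 bp chunks
--     for start_pos in range(0, sequence_length, 1000):
--         end_pos = min(start_pos + 1000, sequence_length)
--         chunk = sequence[start_pos:end_pos]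
--
--         # Count nucleotides in this chunk
--         nucleotide_counts = {
--             'A': chunk.count('A'),
--             'C': chunk.count('C'),
--             'G': chunk.count('G'),
--             'T': chunk.count('T'),
--             'N': chunk.count('N')  # Count ambiguous bases
--         }
--
--         analysis_dict[start_pos] = nucleotide_counts
--
--     return analysis_dict
-- ===== SOURCE B (Python) =====
-- def analyze_sequence_by_kilobase(sequence):
--     """
--     Create a nested dictionary with nucleotide counts for each kilobase.
--     Single-pass version: pre-seed a zero table for every kilobase start,
--     then bucket each A/C/G/T/N character by (i // 1000) * 1000.
--     """
--     result = {start: {'A': 0, 'C': 0, 'G': 0, 'T': 0, 'N': 0}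
--               for start in range(0, len(sequence), 1000)}
--     for i, ch in enumerate(sequence):
--         if ch in 'ACGTN':
--             result[(i // 1000) * 1000][ch] += 1
--     return result
-- ===== Notes on version B (the rewrite author's own statement) =====
-- stated objective: alternative
-- what changed: Replaces the per-chunk five str.count scans with one pre-seeded zero table over the kilobase starts plus a single character-wise pass that buckets each A/C/G/T/N character by (i//1000)*1000.
import Mathlib
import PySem

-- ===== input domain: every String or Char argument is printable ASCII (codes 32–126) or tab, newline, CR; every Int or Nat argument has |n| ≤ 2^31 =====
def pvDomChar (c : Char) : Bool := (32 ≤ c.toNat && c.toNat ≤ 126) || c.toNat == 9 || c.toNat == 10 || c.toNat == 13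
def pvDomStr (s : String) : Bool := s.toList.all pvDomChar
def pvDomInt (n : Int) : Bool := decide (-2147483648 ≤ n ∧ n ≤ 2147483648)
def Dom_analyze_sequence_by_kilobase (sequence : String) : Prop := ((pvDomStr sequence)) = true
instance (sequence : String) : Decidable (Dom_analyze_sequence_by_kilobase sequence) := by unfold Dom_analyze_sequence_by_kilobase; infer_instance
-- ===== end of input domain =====

-- B replaces A's five per-chunk str.count scans by a pre-seeded zero table plus one
-- character-wise bucketing pass (alternative single-pass algorithm, same cost class).

-- ===== PORT A =====
def analyze_sequence_by_kilobase (sequence : String) : List (Int × List (String × Int)) :=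
  let sequence_length : Int := PySem.Str.len sequence
  let analysis_dict : PySem.Dict Int (List (String × Int)) :=
    (PySem.List.pyRange 0 sequence_length 1000).foldl (fun d start_pos =>
      let end_pos : Int := min (start_pos + 1000) sequence_length
      let chunk : String := PySem.Str.slice sequence (some start_pos) (some end_pos)
      d.insert start_pos
        [("A", (PySem.Str.count chunk "A" : Int)),
         ("C", (PySem.Str.count chunk "C" : Int)),
         ("G", (PySem.Str.count chunk "G" : Int)),
         ("T", (PySem.Str.count chunk "T" : Int)),
         ("N", (PySem.Str.count chunk "N" : Int))]) PySem.Dict.empty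
  analysis_dict.items

-- ===== PORT B =====
def analyze_sequence_by_kilobase_alt (sequence : String) : List (Int × List (String × Int)) :=
  let result : PySem.Dict Int (PySem.Dict String Int) :=
    (PySem.List.pyRange 0 (PySem.Str.len sequence) 1000).foldl
      (fun d start => d.insert start
        (PySem.Dict.mk [("A", 0), ("C", 0), ("G", 0), ("T", 0), ("N", 0)]))
      PySem.Dict.empty
  let final : PySem.Dict Int (PySem.Dict String Int) :=
    (PySem.List.enumerate sequence.toList).foldl
      (fun d p =>
        if p.2 ∈ (['A', 'C', 'G', 'T', 'N'] : List Char) then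
          d.modify (PySem.Int.floordiv p.1 1000 * 1000) PySem.Dict.empty
            (fun inner => inner.modify (String.ofList [p.2]) 0 (· + 1))
        else d) result
  final.items.map (fun q => (q.1, q.2.items))

-- ===== PRECONDITION & SPEC =====
def Spec_analyze_sequence_by_kilobase (sequence : String) (out : List (Int × List (String × Int))) : Prop := out = analyze_sequence_by_kilobase_alt sequence
instance (sequence : String) (out : List (Int × List (String × Int))) : Decidable (Spec_analyze_sequence_by_kilobase sequence out) := by unfold Spec_analyze_sequence_by_kilobase; infer_instance

-- ===== CLAIM (what is proved, stated in full; the proofs are below) =====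
def Claim_equal_analyze_sequence_by_kilobase : Prop := ∀ (sequence : String), Dom_analyze_sequence_by_kilobase sequence → Spec_analyze_sequence_by_kilobase sequence (analyze_sequence_by_kilobase sequence)

-- ===== LEMMAS AND PROOFS =====

theorem chars_count_go_singleton (a : Char) : ∀ (l : List Char) (acc : Nat),
    PySem.Chars.count.go [a] l.length l acc = acc + l.count a := by
  intro l
  induction l with
  | nil => intro acc; simp [PySem.Chars.count.go]
  | cons h t ih =>
    intro acc
    show PySem.Chars.count.go [a] (t.length + 1) (h :: t) acc = _
    rw [PySem.Chars.count.go]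
    by_cases hha : a = h
    · subst hha
      simp [List.isPrefixOf, ih]
      omega
    · simp [List.isPrefixOf, hha, ih, Ne.symm hha]

theorem count_singleton (cs : List Char) (a : Char) :
    PySem.Chars.count cs [a] = cs.count a := by
  simp [PySem.Chars.count, chars_count_go_singleton]

theorem foldl_modify_getD {κ ν β : Type} [BEq κ] [LawfulBEq κ] [DecidableEq κ]
    (l : List β) (key : β → κ) (g : β → ν → ν) (d0 : ν) (b : κ) :
    ∀ d : PySem.Dict κ ν,
    (l.foldl (fun d x => d.modify (key x) d0 (g x)) d).getD b d0
      = (l.filter (fun x => key x == b)).foldl (fun v x => g x v) (d.getD b d0) := by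
  induction l with
  | nil => intro d; rfl
  | cons h t ih =>
    intro d
    simp only [List.foldl_cons, List.filter_cons]
    by_cases hkb : key h = b
    · simp [hkb, ih, PySem.Dict.getD_modify]
    · have hf : (key h == b) = false := by simp [hkb]
      simp only [hf, Bool.false_eq_true, if_false]
      rw [ih, PySem.Dict.getD_modify, if_neg (fun hh => hkb hh.symm)]

theorem set_update_of_forall_mem {α : Type} [BEq α] [LawfulBEq α] (s : PySem.Set α) (xs : List α)
    (h : ∀ x ∈ xs, x ∈ s) : PySem.Set.update s xs = s := by
  rw [PySem.Set.update_eq_append_filter]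
  have hf : (PySem.Set.ofList xs).filter (fun y => !PySem.Set.contains s y) = [] := by
    rw [List.filter_eq_nil_iff]
    intro a ha
    have hax : a ∈ xs := (PySem.Set.mem_ofList _ _).mp ha
    simp [h a hax]
  rw [hf, List.append_nil]

theorem nodup_pyRange_1000 (n : Int) : (PySem.List.pyRange 0 n 1000).Nodup := by
  rw [PySem.List.pyRange_of_pos _ _ (by norm_num)]
  apply List.Nodup.map _ (List.nodup_range)
  intro a b hab
  simp only [] at hab
  omega

theorem ofList_singleton_inj {x y : Char} (h : String.ofList [x] = String.ofList [y]) : x = y := by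
  have := congrArg String.toList h
  simpa using this

theorem bucket_eq_iff (i m : Int) :
    (PySem.Int.floordiv i 1000 * 1000 = 1000 * m) ↔ (1000 * m ≤ i ∧ i < 1000 * m + 1000) := by
  have h1000 : (0:Int) < 1000 := by norm_num
  constructor
  · intro hq
    have hf : PySem.Int.floordiv i 1000 = m := by
      rw [mul_comm 1000 m] at hq
      exact mul_right_cancel₀ (by norm_num) hq
    have := (PySem.Int.floordiv_eq_iff_of_pos h1000).mp hf
    have hx : (m + 1) * 1000 = m * 1000 + 1000 := by ring
    omega
  · rintro ⟨h1, h2⟩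
    have hf : PySem.Int.floordiv i 1000 = m := by
      rw [PySem.Int.floordiv_eq_iff_of_pos h1000]
      have hx : (m + 1) * 1000 = m * 1000 + 1000 := by ring
      omega
    rw [hf]; ring

theorem bucket_bounds (i : Int) :
    PySem.Int.floordiv i 1000 * 1000 ≤ i ∧ i < PySem.Int.floordiv i 1000 * 1000 + 1000 := by
  have := (bucket_eq_iff i (PySem.Int.floordiv i 1000)).mp (mul_comm _ _)
  omega

theorem countP_enumerate {α : Type} (p : α → Bool) (s e : Nat) :
    ∀ (l : List α) (t : Nat),
    (PySem.List.enumerate l (t : Int)).countP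
        (fun pr => decide ((s:Int) ≤ pr.1 ∧ pr.1 < (e:Int)) && p pr.2)
      = ((l.take (e - t)).drop (s - t)).countP p := by
  intro l
  induction l with
  | nil => intro t; simp [PySem.List.enumerate_nil]
  | cons h tl ih =>
    intro t
    rw [PySem.List.enumerate_cons, List.countP_cons]
    have h1 : ((t:Int) + 1) = ((t + 1 : Nat) : Int) := by push_cast; ring
    rw [h1, ih (t + 1)]
    by_cases he : e ≤ t
    · have he0 : e - t = 0 := by omega
      have he1 : e - (t + 1) = 0 := by omega
      have hc : (decide ((s:Int) ≤ (t:Int) ∧ (t:Int) < (e:Int)) && p h) = false := by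
        have hlt : ¬ ((t:Int) < (e:Int)) := by exact_mod_cast not_lt.mpr (by omega : (e:Nat) ≤ t)
        simp [hlt]
      rw [he0, he1, hc]
      simp
    · have hte : t < e := by omega
      have hts : e - t = (e - (t + 1)) + 1 := by omega
      rw [hts, List.take_succ_cons]
      by_cases hs : s ≤ t
      · have hs0 : s - t = 0 := by omega
        have hs1 : s - (t + 1) = 0 := by omega
        have hc : (decide ((s:Int) ≤ (t:Int) ∧ (t:Int) < (e:Int)) && p h) = p h := by
          have hc1 : (s:Int) ≤ (t:Int) := by exact_mod_cast hs
          have hc2 : (t:Int) < (e:Int) := by exact_mod_cast hte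
          simp [hc1, hc2]
        rw [hs0, hs1, hc, List.drop_zero, List.drop_zero, List.countP_cons]
      · have hs1 : s - t = (s - (t + 1)) + 1 := by omega
        have hc : (decide ((s:Int) ≤ (t:Int) ∧ (t:Int) < (e:Int)) && p h) = false := by
          have hlt : ¬ ((s:Int) ≤ (t:Int)) := by exact_mod_cast not_le.mpr (by omega : t < s)
          simp [hlt]
        rw [hs1, List.drop_succ_cons, hc]
        simp

theorem A_entry (sequence : String) (bn : Nat) (hbn : bn ≤ sequence.toList.length)
    (c : Char) (s : String) (hs : s.toList = [c]) :
    ((PySem.Str.count (PySem.Str.slice sequence (some (bn:Int))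
        (some (min ((bn:Int) + 1000) (sequence.toList.length : Int)))) s : Nat) : Int)
      = (((sequence.toList.drop bn).take 1000).count c : Int) := by
  rw [PySem.Str.count_eq, hs, PySem.Str.toList_slice, PySem.Chars.slice_eq_listSlice]
  have hmin : min ((bn:Int) + 1000) (sequence.toList.length : Int)
      = ((min (bn + 1000) sequence.toList.length : Nat) : Int) := by push_cast; ring_nf
  rw [hmin, PySem.List.slice_natCast, count_singleton]
  congr 2
  rw [List.take_eq_take_iff]
  simp
  omega

theorem B_entry (l : List Char) (b : Int) (hdvd : (1000:Int) ∣ b) (hb0 : 0 ≤ b)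
    (c : Char) (hc : c ∈ (['A','C','G','T','N'] : List Char)) :
    ((((PySem.List.enumerate l 0).filter
          (fun pr => decide (pr.2 ∈ (['A','C','G','T','N'] : List Char)))).filter
        (fun pr => PySem.Int.floordiv pr.1 1000 * 1000 == b)).foldl
        (fun v pr => v.modify (String.ofList [pr.2]) 0 (· + 1))
        (PySem.Dict.mk [("A",0),("C",0),("G",0),("T",0),("N",0)])).getD (String.ofList [c]) 0
      = ((((l.drop b.toNat).take 1000).count c : Nat) : Int) := by
  obtain ⟨m, hm⟩ := hdvd
  have hfold := List.foldl_map (f := fun pr : Int × Char => String.ofList [pr.2])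
    (g := fun (v : PySem.Dict String Int) k => v.modify k 0 (· + 1))
    (l := ((PySem.List.enumerate l 0).filter
          (fun pr => decide (pr.2 ∈ (['A','C','G','T','N'] : List Char)))).filter
        (fun pr => PySem.Int.floordiv pr.1 1000 * 1000 == b))
    (init := PySem.Dict.mk [("A",(0:Int)),("C",0),("G",0),("T",0),("N",0)])
  rw [← hfold, PySem.Dict.getD_foldl_modify_add_one]
  have h0 : (PySem.Dict.mk [("A",(0:Int)),("C",0),("G",0),("T",0),("N",0)]).getD
      (String.ofList [c]) 0 = 0 := by
    fin_cases hc <;> decide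
  rw [h0, List.count_eq_countP, List.countP_map]
  have hstep : List.countP ((fun x => x == String.ofList [c]) ∘ fun pr : Int × Char => String.ofList [pr.2])
      (((PySem.List.enumerate l 0).filter
          (fun pr => decide (pr.2 ∈ (['A','C','G','T','N'] : List Char)))).filter
        (fun pr => PySem.Int.floordiv pr.1 1000 * 1000 == b))
      = ((l.take (b.toNat + 1000)).drop b.toNat).countP (fun x => x == c) := by
    rw [List.countP_filter, List.countP_filter]
    have hcongr : ∀ pr : Int × Char,
        ((((fun x => x == String.ofList [c]) ∘ fun pr : Int × Char => String.ofList [pr.2]) pr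
            && (PySem.Int.floordiv pr.1 1000 * 1000 == b))
          && decide (pr.2 ∈ (['A','C','G','T','N'] : List Char)))
        = (decide (((b.toNat : Nat) : Int) ≤ pr.1 ∧ pr.1 < ((b.toNat + 1000 : Nat) : Int)) && (pr.2 == c)) := by
      intro pr
      have hb' : ((b.toNat : Nat) : Int) = b := Int.toNat_of_nonneg hb0
      have hiv : (PySem.Int.floordiv pr.1 1000 * 1000 == b)
          = decide (((b.toNat : Nat) : Int) ≤ pr.1 ∧ pr.1 < ((b.toNat + 1000 : Nat) : Int)) := by
        rw [hb']
        have hcast : (((b.toNat + 1000 : Nat)) : Int) = b + 1000 := by push_cast [hb']; ring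
        rw [hcast, Bool.eq_iff_iff]
        simp only [beq_iff_eq, decide_eq_true_eq]
        subst hm
        exact bucket_eq_iff pr.1 m
      cases hpc : (pr.2 == c) with
      | false =>
        have hne : (String.ofList [pr.2] == String.ofList [c]) = false := by
          simp only [beq_eq_false_iff_ne, ne_eq] at hpc ⊢
          intro h; exact hpc (ofList_singleton_inj h)
        simp [Function.comp, hne]
      | true =>
        have hpc' : pr.2 = c := by simpa using hpc
        subst hpc'
        have hmem : decide (pr.2 ∈ (['A','C','G','T','N'] : List Char)) = true := by
          simpa using hc
        simp only [Function.comp] at *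
        rw [hiv]
        simp only [beq_self_eq_true, hmem, Bool.and_true, Bool.true_and]
    rw [List.countP_congr (fun x _ => by rw [hcongr x])]
    have := countP_enumerate (fun x => x == c) b.toNat (b.toNat + 1000) l 0
    simpa using this
  rw [hstep, List.drop_take, List.count_eq_countP]
  have h1000 : b.toNat + 1000 - b.toNat = 1000 := by omega
  rw [h1000]
  simp

theorem main_eq (sequence : String) :
    analyze_sequence_by_kilobase sequence = analyze_sequence_by_kilobase_alt sequence := by
  simp only [analyze_sequence_by_kilobase, analyze_sequence_by_kilobase_alt, PySem.Str.len_eq]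
  set l : List Char := sequence.toList with hl
  set n : Nat := l.length with hn
  set R : List Int := PySem.List.pyRange 0 (n : Int) 1000 with hR
  have hRnodup : R.Nodup := nodup_pyRange_1000 _
  have hmemR : ∀ x : Int, x ∈ R ↔ 0 ≤ x ∧ x < (n : Int) ∧ (1000:Int) ∣ x := by
    intro x
    rw [hR, PySem.List.mem_pyRange_iff_of_pos (by norm_num)]
    constructor
    · rintro ⟨h1, h2, h3⟩; exact ⟨h1, h2, by simpa using h3⟩
    · rintro ⟨h1, h2, h3⟩; exact ⟨h1, h2, by simpa using h3⟩
  -- A side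
  have hA : (R.foldl (fun d start_pos =>
      d.insert start_pos
        [("A", (PySem.Str.count (PySem.Str.slice sequence (some start_pos) (some (min (start_pos + 1000) (n:Int)))) "A" : Int)),
         ("C", (PySem.Str.count (PySem.Str.slice sequence (some start_pos) (some (min (start_pos + 1000) (n:Int)))) "C" : Int)),
         ("G", (PySem.Str.count (PySem.Str.slice sequence (some start_pos) (some (min (start_pos + 1000) (n:Int)))) "G" : Int)),
         ("T", (PySem.Str.count (PySem.Str.slice sequence (some start_pos) (some (min (start_pos + 1000) (n:Int)))) "T" : Int)),
         ("N", (PySem.Str.count (PySem.Str.slice sequence (some start_pos) (some (min (start_pos + 1000) (n:Int)))) "N" : Int))])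
      (PySem.Dict.empty : PySem.Dict Int (List (String × Int)))).items
      = R.map (fun b => (b,
        [("A", (PySem.Str.count (PySem.Str.slice sequence (some b) (some (min (b + 1000) (n:Int)))) "A" : Int)),
         ("C", (PySem.Str.count (PySem.Str.slice sequence (some b) (some (min (b + 1000) (n:Int)))) "C" : Int)),
         ("G", (PySem.Str.count (PySem.Str.slice sequence (some b) (some (min (b + 1000) (n:Int)))) "G" : Int)),
         ("T", (PySem.Str.count (PySem.Str.slice sequence (some b) (some (min (b + 1000) (n:Int)))) "T" : Int)),
         ("N", (PySem.Str.count (PySem.Str.slice sequence (some b) (some (min (b + 1000) (n:Int)))) "N" : Int))])) := by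
    rw [PySem.Dict.items_foldl_insert_fresh R (fun a => a) _ _
      (by intro a _; exact PySem.Dict.contains_empty a)
      (by simpa using hRnodup)]
    rfl
  
  -- B side: the seeded table
  set zeroD : PySem.Dict String Int := PySem.Dict.mk [("A",0),("C",0),("G",0),("T",0),("N",0)] with hzeroD
  set seeded : PySem.Dict Int (PySem.Dict String Int) :=
    R.foldl (fun d start => d.insert start zeroD) PySem.Dict.empty with hseed
  have hSeedItems : seeded.items = R.map (fun b => (b, zeroD)) := by
    rw [hseed, PySem.Dict.items_foldl_insert_fresh R (fun a => a) _ _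
      (by intro a _; exact PySem.Dict.contains_empty a)
      (by simpa using hRnodup)]
    rfl
  have hSeedKeys : seeded.keys = R := by
    simp only [PySem.Dict.keys, hSeedItems, List.map_map]
    exact List.map_id R
  have hSeedNodup : seeded.keys.Nodup := by rw [hSeedKeys]; exact hRnodup
  -- B side: the character pass
  set L5 : List Char := ['A','C','G','T','N'] with hL5
  set fl : List (Int × Char) :=
    (PySem.List.enumerate l).filter (fun pr => decide (pr.2 ∈ L5)) with hfl
  set key : Int × Char → Int := fun pr => PySem.Int.floordiv pr.1 1000 * 1000 with hkey
  have hstep' : (PySem.List.enumerate l).foldl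
      (fun d pr =>
        if pr.2 ∈ L5 then
          d.modify (key pr) PySem.Dict.empty
            (fun inner => inner.modify (String.ofList [pr.2]) 0 (· + 1))
        else d) seeded
      = fl.foldl (fun d pr => d.modify (key pr) PySem.Dict.empty
          (fun inner => inner.modify (String.ofList [pr.2]) 0 (· + 1))) seeded := by
    rw [PySem.List.foldl_ite_eq_foldl_filter (fun pr : Int × Char => pr.2 ∈ L5)]
  set F : PySem.Dict Int (PySem.Dict String Int) :=
    fl.foldl (fun d pr => d.modify (key pr) PySem.Dict.empty
      (fun inner => inner.modify (String.ofList [pr.2]) 0 (· + 1))) seeded with hF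
  have hflmem : ∀ pr ∈ fl, pr ∈ PySem.List.enumerate l (0:Int) ∧ pr.2 ∈ L5 := by
    intro pr hpr
    have := List.mem_filter.mp hpr
    exact ⟨this.1, of_decide_eq_true this.2⟩
  have hFkeys : F.keys = R := by
    rw [hF, PySem.Dict.keys_foldl_modify_key, hSeedKeys, set_update_of_forall_mem]
    intro x hx
    obtain ⟨pr, hpr, rfl⟩ := List.mem_map.mp hx
    obtain ⟨hen, _⟩ := hflmem pr hpr
    obtain ⟨k, hk, hprk⟩ := (PySem.List.mem_enumerate_iff l 0 pr).mp hen
    have hpr1 : pr.1 = (k : Int) := by rw [hprk]; simp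
    have hbb := bucket_bounds pr.1
    rw [hmemR]
    simp only [hkey]
    refine ⟨by omega, by omega, ⟨PySem.Int.floordiv pr.1 1000, mul_comm _ _⟩⟩
  have hFnodup : F.keys.Nodup := by rw [hFkeys]; exact hRnodup
  have hFitems : F.items = R.map (fun b => (b, F.getD b PySem.Dict.empty)) := by
    rw [PySem.Dict.items_eq_map_keys F hFnodup PySem.Dict.empty, hFkeys]
  rw [hA, hstep', hFitems, List.map_map]
  apply List.map_congr_left
  intro b hb
  obtain ⟨hb0, hbn, hdvd⟩ := (hmemR b).mp hb
  -- the bucket dictionary of b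
  have hSeedGet : seeded.getD b PySem.Dict.empty = zeroD := by
    apply PySem.Dict.getD_of_mem_items seeded _ hSeedNodup
    rw [hSeedItems]
    exact List.mem_map_of_mem hb
  have hFget : F.getD b PySem.Dict.empty
      = (fl.filter (fun pr => key pr == b)).foldl
          (fun v pr => v.modify (String.ofList [pr.2]) 0 (· + 1)) zeroD := by
    rw [hF, foldl_modify_getD fl key
      (fun pr => fun inner => inner.modify (String.ofList [pr.2]) 0 (· + 1))
      PySem.Dict.empty b seeded, hSeedGet]
  set inner : PySem.Dict String Int :=
    (fl.filter (fun pr => key pr == b)).foldl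
      (fun v pr => v.modify (String.ofList [pr.2]) 0 (· + 1)) zeroD with hinner
  have hInnerKeys : inner.keys = zeroD.keys := by
    rw [hinner, PySem.Dict.keys_foldl_modify_key, set_update_of_forall_mem]
    intro x hx
    obtain ⟨⟨i, ch⟩, hpr, rfl⟩ := List.mem_map.mp hx
    have hm : ch ∈ L5 := (hflmem _ (List.mem_filter.mp hpr).1).2
    rw [hL5] at hm
    have hk : zeroD.keys = ["A","C","G","T","N"] := by rw [hzeroD]; rfl
    rw [hk]
    fin_cases hm <;> simp
  have hInnerNodup : inner.keys.Nodup := by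
    rw [hInnerKeys, hzeroD]
    decide
  have hInnerItems : inner.items
      = [("A", inner.getD "A" 0), ("C", inner.getD "C" 0), ("G", inner.getD "G" 0),
         ("T", inner.getD "T" 0), ("N", inner.getD "N" 0)] := by
    rw [PySem.Dict.items_eq_map_keys inner hInnerNodup 0, hInnerKeys, hzeroD]
    rfl
  have hEntry : ∀ (c : Char) (s : String), s.toList = [c] →
      c ∈ (['A','C','G','T','N'] : List Char) →
      ((PySem.Str.count (PySem.Str.slice sequence (some b)
          (some (min (b + 1000) (n:Int)))) s : Nat) : Int) = inner.getD s 0 := by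
    intro c s hs hcL
    have hsA : s = String.ofList [c] := by
      have h2 := congrArg String.ofList hs
      simpa using h2
    have hb' : ((b.toNat : Nat) : Int) = b := Int.toNat_of_nonneg hb0
    have hlen : b.toNat ≤ sequence.toList.length := by
      rw [← hl, ← hn]; omega
    have hAe := A_entry sequence b.toNat hlen c s hs
    rw [← hl, ← hn, hb'] at hAe
    have hBval := B_entry l b hdvd hb0 c hcL
    rw [hsA] at hAe
    rw [hsA, hAe, hinner, hfl]
    simp only [hkey, hzeroD, hL5]
    exact hBval.symm
  simp only [Function.comp_apply]
  rw [hFget, hInnerItems]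
  refine congrArg (Prod.mk b) ?_
  refine congrArg₂ _ ?_ (congrArg₂ _ ?_ (congrArg₂ _ ?_ (congrArg₂ _ ?_ (congrArg₂ _ ?_ rfl))))
  all_goals refine congrArg _ ?_
  · exact hEntry 'A' "A" rfl (by decide)
  · exact hEntry 'C' "C" rfl (by decide)
  · exact hEntry 'G' "G" rfl (by decide)
  · exact hEntry 'T' "T" rfl (by decide)
  · exact hEntry 'N' "N" rfl (by decide)

-- ===== VERDICT (by name: the statement is the Claim_ definition above) =====
theorem analyze_sequence_by_kilobase_spec : Claim_equal_analyze_sequence_by_kilobase := by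
  intro sequence _
  unfold Spec_analyze_sequence_by_kilobase
  exact main_eq sequence
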